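-- pv_equiv track=rewrite | github.com/all-in-one-of/icarus | tools/scenemanager/versioning.py | same_structure
-- ===== SOURCE A (Python) =====
-- def same_structure(a, b):
-- 	""" Check if two exploded paths (a and b) have the same structure.
-- 	"""
-- 	x = []; y = []
-- 	for i in a:
-- 		x.append(len(i))
-- 	for j in b:
-- 		y.append(len(j))
-- 	if x==y:
-- 		return True
-- 	else:
-- 		return False
-- ===== SOURCE B (Python) =====
-- from itertools import zip_longest
--
-- _SENTINEL = object()
--
-- def same_structure(a, b):
--     for i, j in zip_longest(a, b, fillvalue=_SENTINEL):
--         if i is _SENTINEL or j is _SENTINEL: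
--             return False
--         if len(i) != len(j):
--             return False
--     return True
-- ===== Notes on version B (the rewrite author's own statement) =====
-- stated objective: alternative
-- what changed: Instead of building two full length lists and comparing them at the end, B walks a and b in lockstep with itertools.zip_longest and a private sentinel, returning False at the first length mismatch or length-count mismatch.
import Mathlib
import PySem

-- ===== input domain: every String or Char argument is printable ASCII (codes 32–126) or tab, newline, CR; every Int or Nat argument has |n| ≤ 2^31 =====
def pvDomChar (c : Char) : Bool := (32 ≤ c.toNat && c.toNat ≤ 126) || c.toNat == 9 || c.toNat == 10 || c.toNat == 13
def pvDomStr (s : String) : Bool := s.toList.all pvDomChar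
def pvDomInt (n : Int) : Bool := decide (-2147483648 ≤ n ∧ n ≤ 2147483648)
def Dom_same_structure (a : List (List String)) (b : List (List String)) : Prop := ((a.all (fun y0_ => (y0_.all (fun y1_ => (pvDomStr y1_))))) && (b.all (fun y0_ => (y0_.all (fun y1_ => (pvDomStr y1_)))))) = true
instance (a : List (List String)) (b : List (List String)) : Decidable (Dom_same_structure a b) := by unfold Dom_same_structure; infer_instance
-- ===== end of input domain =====

-- B fuses A's two list-building passes and the final comparison into one lockstep
-- traversal with early exit (objective: alternative decomposition, same asymptotic cost).

-- ===== PORT A =====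
-- x = []; y = []; for i in a: x.append(len(i)); for j in b: y.append(len(j)); return x == y
def same_structure (a : List (List String)) (b : List (List String)) : Bool :=
  let x : List Int := a.foldl (fun x i => x ++ [(i.length : Int)]) []
  let y : List Int := b.foldl (fun y j => y ++ [(j.length : Int)]) []
  if x == y then true else false

-- ===== PORT B =====
-- lockstep traversal (zip_longest with sentinel): mismatch in counts or in any element length → false
def same_structure_alt (a : List (List String)) (b : List (List String)) : Bool :=
  match a, b with
  | [], [] => true
  | [], _ :: _ => false
  | _ :: _, [] => false
  | i :: a', j :: b' =>
      if i.length ≠ j.length then false else same_structure_alt a' b'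

-- ===== PRECONDITION & SPEC =====
def Spec_same_structure (a : List (List String)) (b : List (List String)) (out : Bool) : Prop := out = same_structure_alt a b
instance (a : List (List String)) (b : List (List String)) (out : Bool) : Decidable (Spec_same_structure a b out) := by unfold Spec_same_structure; infer_instance

-- ===== CLAIM (what is proved, stated in full; the proofs are below) =====
def Claim_equal_same_structure : Prop := ∀ (a : List (List String)) (b : List (List String)), Dom_same_structure a b → Spec_same_structure a b (same_structure a b)

-- ===== LEMMAS AND PROOFS =====
theorem foldl_append_len (a : List (List String)) (acc : List Int) :
    a.foldl (fun x i => x ++ [(i.length : Int)]) acc = acc ++ a.map (fun i => (i.length : Int)) := by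
  induction a generalizing acc with
  | nil => simp
  | cons i a' ih => simp [List.foldl, ih]

theorem alt_eq_map_eq (a b : List (List String)) :
    same_structure_alt a b =
      ((a.map (fun i => (i.length : Int))) == (b.map (fun j => (j.length : Int)))) := by
  induction a generalizing b with
  | nil => cases b <;> simp [same_structure_alt]
  | cons i a' ih =>
    cases b with
    | nil => simp [same_structure_alt]
    | cons j b' =>
      simp only [same_structure_alt, List.map, List.cons_beq_cons]
      by_cases h : i.length = j.length
      · simp [h, ih]
      · have : ¬ ((i.length : Int) = (j.length : Int)) := by exact_mod_cast h
        simp [h, this]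

-- ===== VERDICT (by name: the statement is the Claim_ definition above) =====
theorem same_structure_spec : Claim_equal_same_structure := by
  intro a b _
  unfold Spec_same_structure same_structure
  rw [alt_eq_map_eq, foldl_append_len, foldl_append_len]
  simp only [List.nil_append]
  by_cases h : a.map (fun i => (i.length : Int)) = b.map (fun j => (j.length : Int)) <;> simp [h]
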